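-- pv_equiv track=rewrite | github.com/haesol1013/CP1 | exams/midterm/midterm_6.py | insider
-- ===== SOURCE A (Python) =====
-- def insider(arr: list[set[str]]) -> str:
--     all_mem = []
--     for group in arr:
--         for i in group:
--             all_mem.append(i)
--     set_mem = sorted(set(all_mem))
--     cnt = [all_mem.count(i) for i in set_mem]
--     return set_mem[cnt.index(max(cnt))]
-- ===== SOURCE B (Python) =====
-- def insider(arr: list[set[str]]) -> str:
--     # one streaming pass: tally occurrences and keep a running champion
--     counts = {}
--     best = None
--     for group in arr:
--         for m in group:
--             c = counts.get(m, 0) + 1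
--             counts[m] = c
--             if best is None or c > counts[best] or (c == counts[best] and m < best):
--                 best = m
--     if best is None:
--         raise ValueError("insider() arg contains no members")
--     return best
-- ===== Notes on version B (the rewrite author's own statement) =====
-- stated objective: faster
-- what changed: A builds the flat list, sorts its distinct members, runs a full-list .count scan per distinct member and a cnt.index(max(cnt)) pass; B makes one streaming pass that tallies into a dict while maintaining a running champion online ((count, member) comparison at each occurrence), with no sort and no final extremum pass.
-- outside the precondition, e.g. on insider([]): A raises ValueError, B raises ValueError
import Mathlib
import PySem

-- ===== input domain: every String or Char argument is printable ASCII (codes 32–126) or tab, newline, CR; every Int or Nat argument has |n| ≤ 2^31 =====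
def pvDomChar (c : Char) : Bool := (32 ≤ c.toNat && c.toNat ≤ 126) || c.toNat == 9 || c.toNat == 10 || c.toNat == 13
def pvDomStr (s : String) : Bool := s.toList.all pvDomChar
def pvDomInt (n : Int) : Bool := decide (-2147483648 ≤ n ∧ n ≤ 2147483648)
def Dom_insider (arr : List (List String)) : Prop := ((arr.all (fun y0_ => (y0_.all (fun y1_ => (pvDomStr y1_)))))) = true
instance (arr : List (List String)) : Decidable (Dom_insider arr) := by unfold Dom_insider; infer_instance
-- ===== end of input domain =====

-- B replaces A's sorted-unique-members + per-member full-list .count scans + cnt.index(max(cnt))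
-- by ONE streaming pass that tallies occurrences into a dict while maintaining a running champion.

-- ===== PORT A =====
def insider (arr : List (List String)) : String :=
  let all_mem := arr.foldl (fun acc group => group.foldl (fun a i => a ++ [i]) acc) []
  let set_mem := PySem.List.sorted (PySem.Set.ofList all_mem) (fun x => x)
  let cnt := set_mem.map (fun i => PySem.List.count all_mem i)
  match PySem.List.max? cnt (fun x => x) with
  | none => ""          -- max([]) raises ValueError in Python; excluded by Pre_insider
  | some m =>
    match PySem.List.index? cnt m with
    | none => ""        -- unreachable (m ∈ cnt)
    | some idx => (PySem.List.pyGet? set_mem (idx : Int)).getD ""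

-- ===== PORT B =====
-- the body of B's inner loop: tally this occurrence, update the running champion
def pvStep (st : PySem.Dict String Int × Option String) (m : String) :
    PySem.Dict String Int × Option String :=
  let c := st.1.getD m 0 + 1
  let d := st.1.insert m c
  match st.2 with
  | none => (d, some m)
  | some bb => if c > d.getD bb 0 ∨ (c = d.getD bb 0 ∧ m < bb) then (d, some m) else (d, some bb)

def insider_alt (arr : List (List String)) : String :=
  let st := arr.foldl (fun st group => group.foldl pvStep st) ((PySem.Dict.empty : PySem.Dict String Int), none)
  match st.2 with
  | none => ""          -- Python raises ValueError here; excluded by Pre_insider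
  | some b => b

-- ===== PRECONDITION & SPEC =====
-- Pre_ excludes exactly the inputs with no member at all (arr empty or all groups empty),
-- where A's max([]) and B's explicit raise give ValueError.
def Pre_insider (arr : List (List String)) : Prop := arr.flatten ≠ []
instance (arr : List (List String)) : Decidable (Pre_insider arr) := by unfold Pre_insider; infer_instance
def pvWitness_insider : List (List String) := [["a"], ["a", "b"]]

def Spec_insider (arr : List (List String)) (out : String) : Prop := out = insider_alt arr
instance (arr : List (List String)) (out : String) : Decidable (Spec_insider arr out) := by unfold Spec_insider; infer_instance

-- ===== CLAIM (what is proved, stated in full; the proofs are below) =====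
def Claim_equal_insider : Prop := ∀ (arr : List (List String)), Dom_insider arr → Pre_insider arr → Spec_insider arr (insider arr)

-- ===== LEMMAS AND PROOFS =====

-- the shared characterisation: z is a most-frequent member of xs, smallest among ties
def pvMinAt (xs : List String) (z : String) : Prop :=
  z ∈ xs ∧ ∀ y ∈ xs, xs.count y < xs.count z ∨ (xs.count y = xs.count z ∧ z ≤ y)

theorem pvMinAt_unique {xs : List String} {z₁ z₂ : String}
    (h₁ : pvMinAt xs z₁) (h₂ : pvMinAt xs z₂) : z₁ = z₂ := by
  rcases h₁.2 z₂ h₂.1 with h | ⟨he, hle⟩ <;> rcases h₂.2 z₁ h₁.1 with h' | ⟨he', hle'⟩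
  · omega
  · omega
  · omega
  · exact le_antisymm hle hle'

theorem foldl_append_groups (arr : List (List String)) (acc : List String) :
    arr.foldl (fun acc group => group.foldl (fun a i => a ++ [i]) acc) acc = acc ++ arr.flatten := by
  induction arr generalizing acc with
  | nil => simp
  | cons g t ih =>
    rw [List.foldl_cons, PySem.List.foldl_append_singleton, ih]
    simp

-- ---- A's side: insider returns the pvMinAt element ----
theorem insider_char (arr : List (List String)) (h : arr.flatten ≠ []) :
    pvMinAt arr.flatten (insider arr) := by
  have hall : arr.foldl (fun acc group => group.foldl (fun a i => a ++ [i]) acc) [] = arr.flatten := by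
    simpa using foldl_append_groups arr []
  set xs := arr.flatten with hxs
  set u := PySem.List.sorted (PySem.Set.ofList xs) (fun x => x) with hu
  have hmemu : ∀ y, y ∈ u ↔ y ∈ xs := by
    intro y; rw [hu, PySem.List.mem_sorted, PySem.Set.mem_ofList]
  have hsorted : List.Pairwise (· < ·) u := PySem.List.sorted_ofList_pairwise_lt xs
  set cnt := u.map (fun i => PySem.List.count xs i) with hcnt
  obtain ⟨a, ha⟩ := List.exists_mem_of_ne_nil _ h
  have hau : a ∈ u := (hmemu a).mpr ha
  have hune : u ≠ [] := fun hn => by simp [hn] at hau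
  have hcntne : cnt ≠ [] := by simp [hcnt, hune]
  have hinsider : insider arr =
      match PySem.List.max? cnt (fun x => x) with
      | none => ""
      | some m =>
        match PySem.List.index? cnt m with
        | none => ""
        | some idx => (PySem.List.pyGet? u (idx : Int)).getD "" := by
    simp only [insider, hall]
    rfl
  cases hmax : PySem.List.max? cnt (fun x => x) with
  | none => exact absurd ((PySem.List.max?_eq_none_iff _ _).1 hmax) hcntne
  | some m =>
    have hmmem : m ∈ cnt := PySem.List.max?_mem hmax
    have hmmax : ∀ y ∈ cnt, y ≤ m := fun y hy => PySem.List.max?_isMax hmax y hy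
    cases hidx : PySem.List.index? cnt m with
    | none =>
      exact absurd ((List.idxOf?_eq_none_iff).1 hidx) (by simpa using hmmem)
    | some idx =>
      obtain ⟨hlt, hval, hfirst⟩ := (List.idxOf?_eq_some_iff).1 hidx
      have hlen : idx < u.length := by simpa [hcnt] using hlt
      have hres : insider arr = u[idx] := by
        rw [hinsider, hmax]
        show (match PySem.List.index? cnt m with
              | none => ""
              | some idx => (PySem.List.pyGet? u (idx : Int)).getD "") = u[idx]
        rw [hidx]
        show (PySem.List.pyGet? u (idx : Int)).getD "" = u[idx]
        rw [PySem.List.pyGet?_natCast]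
        simp [List.getElem?_eq_getElem hlen]
      have hcount_r : xs.count u[idx] = m := by
        have := hval
        simpa [hcnt, PySem.List.count_eq] using this
      rw [hres]
      constructor
      · exact (hmemu _).mp (List.getElem_mem hlen)
      · intro y hy
        obtain ⟨j, hj, hjy⟩ := List.mem_iff_getElem.1 ((hmemu y).mpr hy)
        have hjc : j < cnt.length := by simpa [hcnt]
        have hcntj : cnt[j] = xs.count y := by
          simp [hcnt, PySem.List.count_eq, hjy]
        have hle : xs.count y ≤ m := by
          rw [← hcntj]; exact hmmax _ (List.getElem_mem hjc)
        rcases lt_or_eq_of_le hle with hlt' | heq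
        · left; omega
        · -- tie: cnt[j] = m so idx ≤ j, u sorted ⇒ u[idx] ≤ y
          have hjm : cnt[j] = m := by rw [hcntj, heq]
          have hidxle : idx ≤ j := by
            by_contra hcon
            exact hfirst j (by omega) hjm
          have hry : u[idx] ≤ y := by
            rcases eq_or_lt_of_le hidxle with hEq | hLt
            · subst hEq; exact le_of_eq hjy
            · have := (List.pairwise_iff_getElem.1 hsorted) idx j hlen hj hLt
              rw [hjy] at this; exact le_of_lt this
          right
          exact ⟨by omega, hry⟩

-- ---- B's side: the streaming invariant ----
def pvGood (xs : List String) (st : PySem.Dict String Int × Option String) : Prop :=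
  (∀ v, st.1.getD v 0 = (xs.count v : Int)) ∧
  (st.2 = none → xs = []) ∧
  (∀ z, st.2 = some z → pvMinAt xs z)

theorem pvGood_step (xs : List String) (m : String)
    (st : PySem.Dict String Int × Option String) (h : pvGood xs st) :
    pvGood (xs ++ [m]) (pvStep st m) := by
  obtain ⟨hc, hnone, hsome⟩ := h
  have hcount : ∀ v, ((xs ++ [m]).count v : Int) = if v = m then (xs.count v : Int) + 1 else (xs.count v : Int) := by
    intro v
    by_cases hv : v = m
    · simp [List.count_append, hv]
    · simp [List.count_append, hv, Ne.symm hv]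
  have hd : ∀ v, (st.1.insert m (st.1.getD m 0 + 1)).getD v 0 = ((xs ++ [m]).count v : Int) := by
    intro v
    rw [PySem.Dict.getD_insert, hcount v]
    split_ifs with hv
    · subst hv; rw [hc]
    · exact hc v
  cases hb : st.2 with
  | none =>
    have hxs : xs = [] := hnone hb
    subst hxs
    refine ⟨by simpa [pvStep, hb] using hd, by simp [pvStep, hb], ?_⟩
    intro z hz
    simp only [pvStep, hb] at hz
    cases hz
    exact ⟨by simp, by intro y hy; simp at hy; subst hy; right; simp⟩
  | some z =>
    obtain ⟨hzmem, hzmin⟩ := hsome z hb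
    have hcm : st.1.getD m 0 = (xs.count m : Int) := hc m
    have hdz : (st.1.insert m (st.1.getD m 0 + 1)).getD z 0 = ((xs ++ [m]).count z : Int) := hd z
    simp only [pvStep, hb]
    split_ifs with hcond
    · -- champion becomes m
      refine ⟨hd, by simp, ?_⟩
      intro w hw
      cases hw
      -- the update condition can only hold when z ≠ m
      by_cases hzm : z = m
      · exfalso
        have hcz : ((xs ++ [m]).count z : Int) = (xs.count m : Int) + 1 := by
          rw [hzm]; simp [List.count_append]
        rw [hdz, hcm, hcz] at hcond
        rcases hcond with h1 | ⟨h1, h2⟩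
        · omega
        · rw [hzm] at h2; exact lt_irrefl _ h2
      · rw [hdz, hcm] at hcond
        have hcznat : (xs ++ [m]).count z = xs.count z := by
          simp [List.count_append, Ne.symm hzm]
        have hcmnat : (xs ++ [m]).count m = xs.count m + 1 := by simp [List.count_append]
        rw [hcznat] at hcond
        refine ⟨by simp, ?_⟩
        intro y hy
        rcases List.mem_append.1 hy with hy2 | hy2
        · by_cases hym : y = m
          · subst hym; right; exact ⟨rfl, le_refl _⟩
          · have hcynat : (xs ++ [m]).count y = xs.count y := by
              simp [List.count_append, Ne.symm hym]
            rcases hzmin y hy2 with h1 | ⟨h1, h2⟩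
            · rcases hcond with hgt | ⟨heq, hlt⟩
              · left; omega
              · left; omega
            · rcases hcond with hgt | ⟨heq, hlt⟩
              · left; omega
              · right
                refine ⟨by omega, le_of_lt (lt_of_lt_of_le hlt h2)⟩
        · simp at hy2; subst hy2; right; exact ⟨rfl, le_refl _⟩
    · -- champion stays z
      refine ⟨hd, by simp, ?_⟩
      intro w hw
      cases hw
      refine ⟨List.mem_append.2 (Or.inl hzmem), ?_⟩
      by_cases hzm : z = m
      · -- z = m: z's own count grew, so z stays minimal
        have hcznat : (xs ++ [m]).count z = xs.count z + 1 := by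
          rw [hzm]; simp [List.count_append]
        intro y hy
        rcases List.mem_append.1 hy with hy2 | hy2
        · by_cases hym : y = z
          · subst hym; right; exact ⟨rfl, le_refl _⟩
          · have hym' : y ≠ m := fun h => hym (h.trans hzm.symm)
            have hcynat : (xs ++ [m]).count y = xs.count y := by
              simp [List.count_append, Ne.symm hym']
            rcases hzmin y hy2 with h1 | ⟨h1, h2⟩
            · left; omega
            · left; omega
        · simp at hy2; subst hy2; right; rw [← hzm]; exact ⟨rfl, le_refl _⟩
      · -- z ≠ m: the failed condition bounds m's new count by z's
        rw [hdz, hcm] at hcond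
        push Not at hcond
        obtain ⟨hle', htie⟩ := hcond
        have hcznat : (xs ++ [m]).count z = xs.count z := by
          simp [List.count_append, Ne.symm hzm]
        have hcmnat : (xs ++ [m]).count m = xs.count m + 1 := by simp [List.count_append]
        rw [hcznat] at hle' htie
        intro y hy
        by_cases hym : y = m
        · subst hym
          rcases eq_or_lt_of_le hle' with heq | hlt
          · right
            refine ⟨by omega, not_lt.1 (htie heq)⟩
          · left; omega
        · have hcynat : (xs ++ [m]).count y = xs.count y := by
            simp [List.count_append, Ne.symm hym]
          have hy2 : y ∈ xs := by
            rcases List.mem_append.1 hy with h2 | h2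
            · exact h2
            · simp at h2; exact absurd h2 hym
          rcases hzmin y hy2 with h1 | ⟨h1, h2⟩
          · left; omega
          · right; exact ⟨by omega, h2⟩

theorem pvGood_foldl (xs : List String) :
    pvGood xs (xs.foldl pvStep ((PySem.Dict.empty : PySem.Dict String Int), none)) := by
  induction xs using List.reverseRecOn with
  | nil =>
    refine ⟨by intro v; simp [PySem.Dict.getD_empty], fun _ => rfl, ?_⟩
    intro z hz; cases hz
  | append_singleton xs m ih =>
    rw [List.foldl_append]
    exact pvGood_step xs m _ ih

theorem insider_alt_char (arr : List (List String)) (h : arr.flatten ≠ []) :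
    pvMinAt arr.flatten (insider_alt arr) := by
  have hfold : arr.foldl (fun st group => group.foldl pvStep st)
      ((PySem.Dict.empty : PySem.Dict String Int), none)
      = arr.flatten.foldl pvStep ((PySem.Dict.empty : PySem.Dict String Int), none) := by
    rw [List.foldl_flatten]
  have hg := pvGood_foldl arr.flatten
  rw [← hfold] at hg
  obtain ⟨_, hnone, hsome⟩ := hg
  simp only [insider_alt]
  cases hb : (arr.foldl (fun st group => group.foldl pvStep st)
      ((PySem.Dict.empty : PySem.Dict String Int), none)).2 with
  | none => exact absurd (hnone hb) h
  | some z => exact hsome z hb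

-- ===== VERDICT (by name: the statement is the Claim_ definition above) =====
theorem insider_spec : Claim_equal_insider := by
  intro arr _ hpre
  exact pvMinAt_unique (insider_char arr hpre) (insider_alt_char arr hpre)
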